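-- pv_equiv track=rewrite | github.com/hobin01/baekjoon | python/7490.py | calc
-- ===== SOURCE A (Python) =====
-- def parse(s) :
--     res = 0
--     cur = ""
--     oper = 1 # 1 : +, -1 : -
--     for c in s :
--         if c.isdigit() :
--             cur += c
--         else :
--             if len(cur) > 0 :
--                 res += oper * int(cur)
--                 cur = ""
--             if c == '+' :
--                 oper = 1
--             elif c == '-' :
--                 oper = -1
--     if len(cur) > 0 :
--         res += oper * int(cur)
--     return res
--
-- def calc(arr) :
--     res = []
--     # (0, ..., 0) ~ (2, ..., 2)
--     # 0 : ' ', 1 : +, 2 : -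
--     opers = []
--     for i in range(3**(len(arr) - 1)) :
--         tmp = []
--         for j in range(len(arr) - 1) :
--             tmp.append(i % 3)
--             i //= 3
--         opers.append(tmp)
--
--     for op in opers :
--         s = arr[0]
--         for i in range(len(op)) :
--             if op[i] == 1 :
--                 s += "+"
--                 s += arr[i+1]
--             elif op[i] == 2 :
--                 s += "-"
--                 s += arr[i+1]
--             elif op[i] == 0 :
--                 s += arr[i+1]
--         tmp = parse(s)
--         if tmp == 0 :
--             chk = []
--             prevDigit = False
--             for c in s :
--                 if c.isdigit() :
--                     if prevDigit == True :
--                         chk.append(' ')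
--                     prevDigit = True
--                 else :
--                     prevDigit = False
--                 chk.append(c)
--             res.append(''.join(chk))
--     return res
-- ===== SOURCE B (Python) =====
-- def calc(arr):
--     res = []
--     for code in range(3 ** (len(arr) - 1)):
--         # fused single pass: parse value and spaced display are built while streaming chars
--         val = 0          # accumulated signed sum
--         cur = 0          # value of the current digit run
--         has_cur = False  # is there a pending digit run?
--         oper = 1         # sign applied to the next completed run
--         prev_digit = False
--         out = []         # display chars (space inserted between adjacent digits)
--         def step(c):
--             nonlocal val, cur, has_cur, oper, prev_digit
--             if c.isdigit():
--                 if prev_digit: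
--                     out.append(' ')
--                 prev_digit = True
--                 cur = cur * 10 + int(c)
--                 has_cur = True
--             else:
--                 prev_digit = False
--                 if has_cur:
--                     val += oper * cur
--                     cur = 0
--                     has_cur = False
--                 if c == '+':
--                     oper = 1
--                 elif c == '-':
--                     oper = -1
--             out.append(c)
--         i = code
--         for k, piece in enumerate(arr):
--             if k > 0:
--                 d = i % 3
--                 i //= 3
--                 if d == 1:
--                     step('+')
--                 elif d == 2:
--                     step('-')
--             for c in piece:
--                 step(c)
--         if has_cur:
--             val += oper * cur
--         if val == 0:
--             res.append(''.join(out))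
--     return res
-- ===== Notes on version B (the rewrite author's own statement) =====
-- stated objective: alternative
-- what changed: B replaces A's four-stage pipeline (precompute all base-3 operator tuples, build the full expression string, re-parse it char by char, then re-scan it to insert spaces) with a single fused streaming pass per candidate that decodes the base-3 digits on the fly and updates the signed running value and the spaced display string incrementally per character.
-- outside the precondition, e.g. on calc([]): A raises TypeError, B raises TypeError
import Mathlib
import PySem

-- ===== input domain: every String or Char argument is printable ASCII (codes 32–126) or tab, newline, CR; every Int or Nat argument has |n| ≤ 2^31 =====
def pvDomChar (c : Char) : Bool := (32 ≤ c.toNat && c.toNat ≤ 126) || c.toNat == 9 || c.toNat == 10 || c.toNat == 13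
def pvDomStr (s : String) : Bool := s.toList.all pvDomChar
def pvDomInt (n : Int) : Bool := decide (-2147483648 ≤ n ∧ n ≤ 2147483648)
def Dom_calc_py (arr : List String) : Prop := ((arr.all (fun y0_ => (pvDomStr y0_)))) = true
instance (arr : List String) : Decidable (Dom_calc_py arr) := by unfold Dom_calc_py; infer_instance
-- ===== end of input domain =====

-- B fuses A's four stages (operator-tuple table, string build, re-parse, re-space) into one
-- streaming pass per candidate; equivalence of return values is proved for nonempty arr.

-- ===== PORT A =====
-- int(cur): cur is always a (nonempty) run of ASCII digit chars here, where int() is the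
-- plain decimal value — exact on every string this port feeds it.
def pvDecVal (cs : List Char) : Int := cs.foldl (fun a c => a * 10 + ((c.toNat : Int) - 48)) 0

-- c.isdigit() on one char: Char.isDigit, exact on the printable-ASCII domain
def pvParseStep (st : Int × List Char × Int) (c : Char) : Int × List Char × Int :=
  if c.isDigit then (st.1, st.2.1 ++ [c], st.2.2)
  else
    ((if st.2.1.length > 0 then st.1 + st.2.2 * pvDecVal st.2.1 else st.1),
     (if st.2.1.length > 0 then [] else st.2.1),
     (if c = '+' then 1 else if c = '-' then (-1) else st.2.2))

def pvParse (s : List Char) : Int :=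
  let st := s.foldl pvParseStep (0, [], 1)
  if st.2.1.length > 0 then st.1 + st.2.2 * pvDecVal st.2.1 else st.1

def pvOpers (n : Nat) : List (List Int) :=
  (PySem.List.pyRange 0 ((3 ^ (n - 1) : Nat) : Int) 1).foldl
    (fun opers i =>
      opers ++ [((PySem.List.pyRange 0 ((n : Int) - 1) 1).foldl
        (fun (p : List Int × Int) _ =>
          (p.1 ++ [PySem.Int.mod p.2 3], PySem.Int.floordiv p.2 3))
        ([], i)).1])
    []

-- for i in range(len(op)): op[i] and arr[i+1] are always in range
def pvBuild (arr : List String) (op : List Int) : List Char :=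
  (PySem.List.pyRange 0 (op.length : Int) 1).foldl
    (fun s i =>
      if PySem.List.pyGetD op i 0 = 1 then s ++ ['+'] ++ (PySem.List.pyGetD arr (i + 1) "").toList
      else if PySem.List.pyGetD op i 0 = 2 then s ++ ['-'] ++ (PySem.List.pyGetD arr (i + 1) "").toList
      else if PySem.List.pyGetD op i 0 = 0 then s ++ (PySem.List.pyGetD arr (i + 1) "").toList
      else s)
    (PySem.List.pyGetD arr 0 "").toList

def pvRespaceStep (p : List Char × Bool) (c : Char) : List Char × Bool :=
  if c.isDigit then ((if p.2 then p.1 ++ [' '] else p.1) ++ [c], true)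
  else (p.1 ++ [c], false)

def pvRespace (s : List Char) : List Char := (s.foldl pvRespaceStep ([], false)).1

def calc_py (arr : List String) : List String :=
  (pvOpers arr.length).foldl
    (fun res op =>
      if pvParse (pvBuild arr op) = 0 then res ++ [String.ofList (pvRespace (pvBuild arr op))]
      else res)
    []

-- ===== PORT B =====
structure PvSt where
  val : Int
  cur : Int
  has : Bool
  oper : Int
  prev : Bool
  out : List Char
deriving Repr, DecidableEq

def pvStep (st : PvSt) (c : Char) : PvSt :=
  if c.isDigit then
    { val := st.val, cur := st.cur * 10 + ((c.toNat : Int) - 48), has := true, oper := st.oper,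
      prev := true, out := (if st.prev then st.out ++ [' '] else st.out) ++ [c] }
  else
    { val := if st.has then st.val + st.oper * st.cur else st.val,
      cur := if st.has then 0 else st.cur,
      has := false,
      oper := if c = '+' then 1 else if c = '-' then (-1) else st.oper,
      prev := false,
      out := st.out ++ [c] }

def pvInit : PvSt := ⟨0, 0, false, 1, false, []⟩

def pvPieceStep (p : PvSt × Int) (ka : Int × String) : PvSt × Int :=
  if ka.1 > 0 then
    (ka.2.toList.foldl pvStep
       (if PySem.Int.mod p.2 3 = 1 then pvStep p.1 '+'
        else if PySem.Int.mod p.2 3 = 2 then pvStep p.1 '-'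
        else p.1),
     PySem.Int.floordiv p.2 3)
  else (ka.2.toList.foldl pvStep p.1, p.2)

def calc_py_alt (arr : List String) : List String :=
  (PySem.List.pyRange 0 ((3 ^ (arr.length - 1) : Nat) : Int) 1).foldl
    (fun res code =>
      let st := ((PySem.List.enumerate arr).foldl pvPieceStep (pvInit, code)).1
      if (if st.has then st.val + st.oper * st.cur else st.val) = 0 then
        res ++ [String.ofList st.out]
      else res)
    []

-- ===== PRECONDITION & SPEC =====
-- A raises TypeError on arr = [] (range(3 ** -1)); excluded.
def Pre_calc_py (arr : List String) : Prop := arr ≠ []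
instance (arr : List String) : Decidable (Pre_calc_py arr) := by unfold Pre_calc_py; infer_instance
def pvWitness_calc_py : List String := ["1", "2", "1"]
def Spec_calc_py (arr : List String) (out : List String) : Prop := out = calc_py_alt arr
instance (arr : List String) (out : List String) : Decidable (Spec_calc_py arr out) := by unfold Spec_calc_py; infer_instance

-- ===== CLAIM (what is proved, stated in full; the proofs are below) =====
def Claim_equal_calc_py : Prop := ∀ (arr : List String), Dom_calc_py arr → Pre_calc_py arr → Spec_calc_py arr (calc_py arr)

-- ===== LEMMAS AND PROOFS =====

-- little-endian base-3 digits, as A's inner loop produces them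
def pvDigitsL : Nat → Int → List Int
  | 0, _ => []
  | m + 1, i => PySem.Int.mod i 3 :: pvDigitsL m (PySem.Int.floordiv i 3)

def pvIterDiv : Nat → Int → Int
  | 0, i => i
  | m + 1, i => pvIterDiv m (PySem.Int.floordiv i 3)

def pvSep (d : Int) : List Char := if d = 1 then ['+'] else if d = 2 then ['-'] else []

def pvChunks : List Int → List String → List Char
  | d :: ds, a :: as => pvSep d ++ a.toList ++ pvChunks ds as
  | _, _ => []

theorem pvDigitsL_length (m : Nat) (i : Int) : (pvDigitsL m i).length = m := by
  induction m generalizing i with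
  | zero => rfl
  | succ m ih => simp [pvDigitsL, ih]

theorem pvDigitsL_mem (m : Nat) (i : Int) : ∀ d ∈ pvDigitsL m i, d = 0 ∨ d = 1 ∨ d = 2 := by
  induction m generalizing i with
  | zero => simp [pvDigitsL]
  | succ m ih =>
    intro d hd
    simp only [pvDigitsL, List.mem_cons] at hd
    rcases hd with h | h
    · have h1 := PySem.Int.mod_nonneg i (b := 3) (by omega)
      have h2 := PySem.Int.mod_lt i (b := 3) (by omega)
      omega
    · exact ih _ d h

theorem pvDigits_fold {α : Type} (l : List α) :
    ∀ (acc : List Int) (i : Int),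
    l.foldl (fun (p : List Int × Int) _ =>
      (p.1 ++ [PySem.Int.mod p.2 3], PySem.Int.floordiv p.2 3)) (acc, i)
    = (acc ++ pvDigitsL l.length i, pvIterDiv l.length i) := by
  induction l with
  | nil => simp [pvDigitsL, pvIterDiv]
  | cons x xs ih =>
    intro acc i
    simp only [List.foldl_cons, List.length_cons, pvDigitsL, pvIterDiv, ih]
    simp

theorem pvRel_step (st : PvSt) (p : Int × List Char × Int) (r : List Char × Bool) (c : Char)
    (h1 : st.val = p.1) (h2 : st.oper = p.2.2) (h3 : st.prev = r.2) (h4 : st.out = r.1)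
    (h5 : st.cur = pvDecVal p.2.1) (h6 : st.has = true ↔ p.2.1 ≠ []) :
    (pvStep st c).val = (pvParseStep p c).1 ∧ (pvStep st c).oper = (pvParseStep p c).2.2 ∧
    (pvStep st c).prev = (pvRespaceStep r c).2 ∧ (pvStep st c).out = (pvRespaceStep r c).1 ∧
    (pvStep st c).cur = pvDecVal (pvParseStep p c).2.1 ∧
    ((pvStep st c).has = true ↔ (pvParseStep p c).2.1 ≠ []) := by
  by_cases hd : c.isDigit
  · refine ⟨?_, ?_, ?_, ?_, ?_, ?_⟩ <;>
      simp [pvStep, pvParseStep, pvRespaceStep, hd, h1, h2, h3, h4, h5, pvDecVal]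
  · have hlen : p.2.1.length > 0 ↔ st.has = true := by
      rw [h6]; cases p.2.1 <;> simp
    by_cases hh : st.has = true <;>
      refine ⟨?_, ?_, ?_, ?_, ?_, ?_⟩ <;>
        simp [pvStep, pvParseStep, pvRespaceStep, hd, h1, h2, h4, h5, hh,
              hlen.2, pvDecVal] <;>
        first
        | (exact h6.1 hh)
        | (simp_all)

theorem pvRel_fold (cs : List Char) :
    ∀ (st : PvSt) (p : Int × List Char × Int) (r : List Char × Bool),
    st.val = p.1 → st.oper = p.2.2 → st.prev = r.2 → st.out = r.1 →
    st.cur = pvDecVal p.2.1 → (st.has = true ↔ p.2.1 ≠ []) →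
    (cs.foldl pvStep st).val = (cs.foldl pvParseStep p).1 ∧
    (cs.foldl pvStep st).oper = (cs.foldl pvParseStep p).2.2 ∧
    (cs.foldl pvStep st).prev = (cs.foldl pvRespaceStep r).2 ∧
    (cs.foldl pvStep st).out = (cs.foldl pvRespaceStep r).1 ∧
    (cs.foldl pvStep st).cur = pvDecVal (cs.foldl pvParseStep p).2.1 ∧
    ((cs.foldl pvStep st).has = true ↔ (cs.foldl pvParseStep p).2.1 ≠ []) := by
  induction cs with
  | nil => intro st p r h1 h2 h3 h4 h5 h6; exact ⟨h1, h2, h3, h4, h5, h6⟩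
  | cons c cs ih =>
    intro st p r h1 h2 h3 h4 h5 h6
    obtain ⟨g1, g2, g3, g4, g5, g6⟩ := pvRel_step st p r c h1 h2 h3 h4 h5 h6
    exact ih _ _ _ g1 g2 g3 g4 g5 g6

theorem pvStream_pieces (rest : List String) :
    ∀ (s : Int), 1 ≤ s → ∀ (st : PvSt) (i : Int),
    ((PySem.List.enumerate rest s).foldl pvPieceStep (st, i)).1
    = (pvChunks (pvDigitsL rest.length i) rest).foldl pvStep st := by
  induction rest with
  | nil => intro s hs st i; simp [pvDigitsL, pvChunks]
  | cons a as ih =>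
    intro s hs st i
    rw [PySem.List.enumerate_cons, List.foldl_cons]
    have hstep : pvPieceStep (st, i) (s, a)
        = (a.toList.foldl pvStep ((pvSep (PySem.Int.mod i 3)).foldl pvStep st),
           PySem.Int.floordiv i 3) := by
      have hpos : (0 : Int) < s := by omega
      have h0 : 0 ≤ i % 3 := Int.emod_nonneg i (by omega)
      have h3 : i % 3 < 3 := Int.emod_lt_of_pos i (by omega)
      have : i % 3 = 0 ∨ i % 3 = 1 ∨ i % 3 = 2 := by omega
      rcases this with h | h | h <;> simp [pvPieceStep, pvSep, h, hpos]
    rw [hstep, ih (s + 1) (by omega)]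
    simp [pvDigitsL, pvChunks, List.foldl_append]

theorem pvBuild_go (op : List Int) (arr : List String) :
    ∀ (ds : List Int) (rs : List String) (k : Nat) (acc : List Char),
    op.drop k = ds → arr.drop (k + 1) = rs → k + ds.length = op.length →
    op.length + 1 = arr.length → (∀ d ∈ ds, d = 0 ∨ d = 1 ∨ d = 2) →
    (PySem.List.pyRange (k : Int) (op.length : Int) 1).foldl
      (fun s i =>
        if PySem.List.pyGetD op i 0 = 1 then s ++ ['+'] ++ (PySem.List.pyGetD arr (i + 1) "").toList
        else if PySem.List.pyGetD op i 0 = 2 then s ++ ['-'] ++ (PySem.List.pyGetD arr (i + 1) "").toList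
        else if PySem.List.pyGetD op i 0 = 0 then s ++ (PySem.List.pyGetD arr (i + 1) "").toList
        else s)
      acc
    = acc ++ pvChunks ds rs := by
  intro ds
  induction ds with
  | nil =>
    intro rs k acc h1 h2 h3 h4 h5
    simp only [List.length_nil, Nat.add_zero] at h3
    rw [PySem.List.pyRange_one_eq_nil (by omega)]
    simp [pvChunks]
  | cons d ds ih =>
    intro rs k acc h1 h2 h3 h4 h5
    have hk : k < op.length := by simp at h3; omega
    have hop : op[k] = d ∧ op.drop (k + 1) = ds := by
      have := List.getElem_cons_drop (as := op) (i := k) hk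
      rw [h1] at this
      refine ⟨?_, ?_⟩
      · have h := congrArg (fun l => l.headD 0) this
        simpa [List.getElem?_eq_getElem hk] using h
      · have h := congrArg List.tail this
        simpa using h
    have hk1 : k + 1 < arr.length := by omega
    obtain ⟨r, rs', hrs⟩ : ∃ r rs', rs = r :: rs' := by
      have : rs.length = arr.length - (k + 1) := by rw [← h2]; simp
      cases rs with
      | nil => exfalso; simp at this; omega
      | cons r rs' => exact ⟨r, rs', rfl⟩
    have harr : arr[k + 1] = r ∧ arr.drop (k + 2) = rs' := by
      have := List.getElem_cons_drop (as := arr) (i := k + 1) hk1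
      rw [h2, hrs] at this
      refine ⟨?_, ?_⟩
      · have h := congrArg (fun l => l.headD "") this
        simpa [List.getElem?_eq_getElem hk1] using h
      · have h := congrArg List.tail this
        simpa [show k + 1 + 1 = k + 2 by omega] using h
    rw [PySem.List.pyRange_one_cons (by exact_mod_cast hk), List.foldl_cons]
    have hgop : PySem.List.pyGetD op (k : Int) 0 = d := by
      rw [PySem.List.pyGetD_natCast, List.getD_eq_getElem _ _ hk, hop.1]
    have hgarr : PySem.List.pyGetD arr ((k : Int) + 1) "" = r := by
      have : ((k : Int) + 1) = ((k + 1 : Nat) : Int) := by push_cast; ring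
      rw [this, PySem.List.pyGetD_natCast, List.getD_eq_getElem _ _ hk1, harr.1]
    have hd : d = 0 ∨ d = 1 ∨ d = 2 := h5 d (by simp)
    have hstep : ∀ s : List Char,
        (if PySem.List.pyGetD op (k:Int) 0 = 1 then s ++ ['+'] ++ (PySem.List.pyGetD arr ((k:Int) + 1) "").toList
         else if PySem.List.pyGetD op (k:Int) 0 = 2 then s ++ ['-'] ++ (PySem.List.pyGetD arr ((k:Int) + 1) "").toList
         else if PySem.List.pyGetD op (k:Int) 0 = 0 then s ++ (PySem.List.pyGetD arr ((k:Int) + 1) "").toList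
         else s)
        = s ++ pvSep d ++ r.toList := by
      intro s
      rw [hgop, hgarr]
      rcases hd with h | h | h <;> simp [pvSep, h]
    have hcast : (k : Int) + 1 = ((k + 1 : Nat) : Int) := by push_cast; ring
    rw [hstep, hcast, ih rs' (k + 1) _ hop.2 (by rw [← harr.2]) (by simp at h3 ⊢; omega) h4
        (fun x hx => h5 x (by simp [hx]))]
    simp [hrs, pvChunks]

theorem pvPerCode (a0 : String) (rest : List String) (res : List String) (i : Int) :
    (if pvParse (pvBuild (a0 :: rest) (pvDigitsL rest.length i)) = 0 then
       res ++ [String.ofList (pvRespace (pvBuild (a0 :: rest) (pvDigitsL rest.length i)))]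
     else res)
    = (if (if ((PySem.List.enumerate (a0 :: rest)).foldl pvPieceStep (pvInit, i)).1.has then
             ((PySem.List.enumerate (a0 :: rest)).foldl pvPieceStep (pvInit, i)).1.val +
               ((PySem.List.enumerate (a0 :: rest)).foldl pvPieceStep (pvInit, i)).1.oper *
                 ((PySem.List.enumerate (a0 :: rest)).foldl pvPieceStep (pvInit, i)).1.cur
           else ((PySem.List.enumerate (a0 :: rest)).foldl pvPieceStep (pvInit, i)).1.val) = 0 then
         res ++ [String.ofList ((PySem.List.enumerate (a0 :: rest)).foldl pvPieceStep (pvInit, i)).1.out]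
       else res) := by
  set op := pvDigitsL rest.length i with hop
  have hlen : op.length = rest.length := pvDigitsL_length _ _
  have hbuild : pvBuild (a0 :: rest) op = a0.toList ++ pvChunks op rest := by
    unfold pvBuild
    have h0 : PySem.List.pyGetD (a0 :: rest) 0 "" = a0 := by
      simp
    have := pvBuild_go op (a0 :: rest) op rest 0 a0.toList rfl rfl (by omega)
      (by simp [hlen]) (pvDigitsL_mem _ _)
    rw [h0, ← this]
    norm_num
  have hst : ((PySem.List.enumerate (a0 :: rest)).foldl pvPieceStep (pvInit, i)).1
      = (pvBuild (a0 :: rest) op).foldl pvStep pvInit := by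
    rw [PySem.List.enumerate_cons, List.foldl_cons]
    have hfirst : pvPieceStep (pvInit, i) (0, a0) = (a0.toList.foldl pvStep pvInit, i) := by
      simp [pvPieceStep]
    rw [hfirst]
    simp only [show (0 : Int) + 1 = 1 from rfl]
    rw [pvStream_pieces rest 1 (by omega), hbuild, List.foldl_append, ← hop]
  obtain ⟨g1, g2, _, g4, g5, g6⟩ := pvRel_fold (pvBuild (a0 :: rest) op) pvInit (0, [], 1)
    ([], false) rfl rfl rfl rfl rfl (by simp [pvInit])
  set st := (pvBuild (a0 :: rest) op).foldl pvStep pvInit with hstdef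
  set P := (pvBuild (a0 :: rest) op).foldl pvParseStep (0, [], 1) with hP
  have hval : (if st.has then st.val + st.oper * st.cur else st.val)
      = pvParse (pvBuild (a0 :: rest) op) := by
    unfold pvParse
    by_cases hh : st.has = true
    · have hne : P.2.1 ≠ [] := g6.1 hh
      have : P.2.1.length > 0 := by cases hp : P.2.1 <;> simp_all
      simp [hh, this, g1, g2, g5, ← hP]
    · have he : P.2.1 = [] := by
        by_contra hne
        exact hh (g6.2 hne)
      simp [hh, he, g1, ← hP]
  have hout : st.out = pvRespace (pvBuild (a0 :: rest) op) := by
    rw [g4]; rfl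
  rw [hst, hval, hout]

-- ===== VERDICT (by name: the statement is the Claim_ definition above) =====
theorem calc_py_spec : Claim_equal_calc_py := by
  intro arr _ hpre
  unfold Spec_calc_py
  cases arr with
  | nil => exact absurd rfl hpre
  | cons a0 rest =>
    unfold calc_py calc_py_alt pvOpers
    simp only [List.length_cons, Nat.add_sub_cancel]
    have hinner : ∀ i : Int,
        ((PySem.List.pyRange 0 (((rest.length + 1 : Nat) : Int) - 1) 1).foldl
          (fun (p : List Int × Int) _ =>
            (p.1 ++ [PySem.Int.mod p.2 3], PySem.Int.floordiv p.2 3)) ([], i)).1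
        = pvDigitsL rest.length i := by
      intro i
      rw [pvDigits_fold]
      have : (PySem.List.pyRange 0 (((rest.length + 1 : Nat) : Int) - 1) 1).length
          = rest.length := by
        rw [PySem.List.length_pyRange_one]; push_cast; omega
      rw [this]
      simp
    simp only [hinner]
    rw [PySem.List.foldl_append_singleton_eq_map, List.nil_append, List.foldl_map]
    exact List.foldl_ext _ _ _ (fun res i _ => pvPerCode a0 rest res i)
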